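-- pv_equiv track=rewrite | github.com/tonyyzy/advent-of-code-2020 | day17-2.py | update_xyz
-- ===== SOURCE A (Python) =====
-- def update_xyz(active):
--     # update x, y, z
--     t = [a[0] for a in active]
--     x = (min(t) - 1, max(t) + 2)
--     t = [a[1] for a in active]
--     y = (min(t) - 1, max(t) + 2)
--     t = [a[2] for a in active]
--     z = (min(t) - 1, max(t) + 2)
--     t = [a[3] for a in active]
--     w = (min(t) - 1, max(t) + 2)
--     return x, y, z, w
-- ===== SOURCE B (Python) =====
-- def update_xyz(active):
--     # one pass: track all eight extrema simultaneously
--     x0, y0, z0, w0 = active[0]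
--     xmn = xmx = x0
--     ymn = ymx = y0
--     zmn = zmx = z0
--     wmn = wmx = w0
--     for a, b, c, d in active[1:]:
--         if a < xmn: xmn = a
--         if a > xmx: xmx = a
--         if b < ymn: ymn = b
--         if b > ymx: ymx = b
--         if c < zmn: zmn = c
--         if c > zmx: zmx = c
--         if d < wmn: wmn = d
--         if d > wmx: wmx = d
--     return (xmn - 1, xmx + 2), (ymn - 1, ymx + 2), (zmn - 1, zmx + 2), (wmn - 1, wmx + 2)
-- ===== Notes on version B (the rewrite author's own statement) =====
-- stated objective: alternative
-- what changed: replaced four list-comprehension + min + max passes (eight traversals and four intermediate lists) with a single loop maintaining eight running extrema initialized from the first point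
import Mathlib
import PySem

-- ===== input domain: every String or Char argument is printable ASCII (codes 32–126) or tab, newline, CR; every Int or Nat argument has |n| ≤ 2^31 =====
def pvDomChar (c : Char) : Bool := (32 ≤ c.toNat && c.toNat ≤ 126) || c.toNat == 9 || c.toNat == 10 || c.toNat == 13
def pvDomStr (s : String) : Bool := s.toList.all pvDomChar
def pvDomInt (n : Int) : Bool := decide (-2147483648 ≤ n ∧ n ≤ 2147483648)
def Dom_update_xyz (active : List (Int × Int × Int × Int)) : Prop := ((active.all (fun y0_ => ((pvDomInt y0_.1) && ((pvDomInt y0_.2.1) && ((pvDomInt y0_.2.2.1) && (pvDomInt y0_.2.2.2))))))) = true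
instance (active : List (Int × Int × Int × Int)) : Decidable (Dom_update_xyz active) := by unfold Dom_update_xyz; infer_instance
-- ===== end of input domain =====

-- B replaces A's four comprehension+min+max passes by one loop carrying eight running extrema (alternative decomposition, same asymptotic cost).

-- ===== PORT A =====
-- A: four passes, each building the list of one coordinate then taking min-1 and max+2.
def update_xyz (active : List (Int × Int × Int × Int)) : (Int × Int) × (Int × Int) × (Int × Int) × (Int × Int) :=
  let t := active.map (fun a => a.1)
  let x := ((PySem.List.min? t (fun v => v)).getD 0 - 1, (PySem.List.max? t (fun v => v)).getD 0 + 2)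
  let t := active.map (fun a => a.2.1)
  let y := ((PySem.List.min? t (fun v => v)).getD 0 - 1, (PySem.List.max? t (fun v => v)).getD 0 + 2)
  let t := active.map (fun a => a.2.2.1)
  let z := ((PySem.List.min? t (fun v => v)).getD 0 - 1, (PySem.List.max? t (fun v => v)).getD 0 + 2)
  let t := active.map (fun a => a.2.2.2)
  let w := ((PySem.List.min? t (fun v => v)).getD 0 - 1, (PySem.List.max? t (fun v => v)).getD 0 + 2)
  (x, y, z, w)

-- ===== PORT B =====
-- B's loop over active[1:], updating the eight extrema with the same comparisons as Source B.
def updateXyzAltLoop : List (Int × Int × Int × Int) →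
    (Int × Int) × (Int × Int) × (Int × Int) × (Int × Int) →
    (Int × Int) × (Int × Int) × (Int × Int) × (Int × Int)
  | [], st => st
  | (a, b, c, d) :: rest, ((xmn, xmx), (ymn, ymx), (zmn, zmx), (wmn, wmx)) =>
    updateXyzAltLoop rest
      ((if a < xmn then a else xmn, if a > xmx then a else xmx),
       (if b < ymn then b else ymn, if b > ymx then b else ymx),
       (if c < zmn then c else zmn, if c > zmx then c else zmx),
       (if d < wmn then d else wmn, if d > wmx then d else wmx))

def update_xyz_alt (active : List (Int × Int × Int × Int)) : (Int × Int) × (Int × Int) × (Int × Int) × (Int × Int) :=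
  match active with
  | [] => ((0, 0), (0, 0), (0, 0), (0, 0))  -- unreachable under Pre_ (Source B raises IndexError on [])
  | (x0, y0, z0, w0) :: rest =>
    let st := updateXyzAltLoop rest ((x0, x0), (y0, y0), (z0, z0), (w0, w0))
    ((st.1.1 - 1, st.1.2 + 2), (st.2.1.1 - 1, st.2.1.2 + 2),
     (st.2.2.1.1 - 1, st.2.2.1.2 + 2), (st.2.2.2.1 - 1, st.2.2.2.2 + 2))

-- ===== PRECONDITION & SPEC =====
-- Pre_ excludes the empty list, on which A raises ValueError (min of empty list) and B raises IndexError.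
def Pre_update_xyz (active : List (Int × Int × Int × Int)) : Prop := active ≠ []
instance (active : List (Int × Int × Int × Int)) : Decidable (Pre_update_xyz active) := by unfold Pre_update_xyz; infer_instance
def pvWitness_update_xyz : (List (Int × Int × Int × Int)) := [(0, 1, 2, 3)]

def Spec_update_xyz (active : List (Int × Int × Int × Int)) (out : (Int × Int) × (Int × Int) × (Int × Int) × (Int × Int)) : Prop := out = update_xyz_alt active
instance (active : List (Int × Int × Int × Int)) (out : (Int × Int) × (Int × Int) × (Int × Int) × (Int × Int)) : Decidable (Spec_update_xyz active out) := by unfold Spec_update_xyz; infer_instance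

-- ===== CLAIM (what is proved, stated in full; the proofs are below) =====
def Claim_equal_update_xyz : Prop := ∀ (active : List (Int × Int × Int × Int)), Dom_update_xyz active → Pre_update_xyz active → Spec_update_xyz active (update_xyz active)

-- ===== LEMMAS AND PROOFS =====

theorem if_lt_eq_min (a s : Int) : (if a < s then a else s) = min s a := by
  split_ifs with h <;> omega

theorem if_gt_eq_max (a s : Int) : (if a > s then a else s) = max s a := by
  split_ifs with h <;> omega

-- The combined one-pass loop computes the eight componentwise folds.
theorem updateXyzAltLoop_eq (t : List (Int × Int × Int × Int))
    (xmn xmx ymn ymx zmn zmx wmn wmx : Int) :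
    updateXyzAltLoop t ((xmn, xmx), (ymn, ymx), (zmn, zmx), (wmn, wmx)) =
      ((t.foldl (fun s p => min s p.1) xmn, t.foldl (fun s p => max s p.1) xmx),
       (t.foldl (fun s p => min s p.2.1) ymn, t.foldl (fun s p => max s p.2.1) ymx),
       (t.foldl (fun s p => min s p.2.2.1) zmn, t.foldl (fun s p => max s p.2.2.1) zmx),
       (t.foldl (fun s p => min s p.2.2.2) wmn, t.foldl (fun s p => max s p.2.2.2) wmx)) := by
  induction t generalizing xmn xmx ymn ymx zmn zmx wmn wmx with
  | nil => rfl
  | cons hd tl ih =>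
    obtain ⟨a, b, c, d⟩ := hd
    simp only [updateXyzAltLoop, List.foldl_cons, ih, if_lt_eq_min, if_gt_eq_max]

-- ===== VERDICT (by name: the statement is the Claim_ definition above) =====
theorem update_xyz_spec : Claim_equal_update_xyz := by
  intro active _ hpre
  unfold Spec_update_xyz
  match active with
  | [] => exact absurd rfl hpre
  | (x0, y0, z0, w0) :: rest =>
    simp only [update_xyz, update_xyz_alt, List.map_cons,
      PySem.List.min?_id_cons, PySem.List.max?_id_cons, Option.getD_some,
      List.foldl_map, updateXyzAltLoop_eq]
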